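-- pv_equiv track=rewrite | github.com/MrBrantCode/unitest_baseline | mut_generate/mist_train_cf/cf_91768/solution.py | max_consecutive_subarrays
-- ===== SOURCE A (Python) =====
-- def max_consecutive_subarrays(arr, target_sum):
--     count = 0
--     max_count = 0
--
--     # Iterate through each element in the array
--     for i in range(len(arr)):
--         current_sum = 0
--
--         # Check if there are at least 3 elements remaining in the array
--         if i + 2 < len(arr):
--             # Calculate the sum of the next 3 elements
--             current_sum = arr[i] + arr[i+1] + arr[i+2]
--
--             # If the sum is equal to the target sum, increment the count
--             if current_sum == target_sum:
--                 count += 1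
--                 max_count = max(max_count, count)
--             else:
--                 # If the sum is not equal to the target sum, reset the count
--                 count = 0
--
--     return max_count
-- ===== SOURCE B (Python) =====
-- def max_consecutive_subarrays(arr, target_sum):
--     # Pass 1: evaluate every 3-element window once.
--     matches = [arr[i] + arr[i+1] + arr[i+2] == target_sum for i in range(len(arr) - 2)]
--
--     # Pass 2: longest run of consecutive True values, jumping over whole runs.
--     best = 0
--     n = len(matches)
--     i = 0
--     while i < n:
--         if matches[i]:
--             j = i + 1
--             while j < n and matches[j]:
--                 j += 1
--             best = max(best, j - i)
--             i = j
--         else: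
--             i += 1
--     return best
-- ===== Notes on version B (the rewrite author's own statement) =====
-- stated objective: alternative
-- what changed: Splits A's single interleaved counter/reset loop into two separate passes: first build the boolean window-match sequence, then measure the longest run of consecutive True values by jumping over whole runs.
import Mathlib
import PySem

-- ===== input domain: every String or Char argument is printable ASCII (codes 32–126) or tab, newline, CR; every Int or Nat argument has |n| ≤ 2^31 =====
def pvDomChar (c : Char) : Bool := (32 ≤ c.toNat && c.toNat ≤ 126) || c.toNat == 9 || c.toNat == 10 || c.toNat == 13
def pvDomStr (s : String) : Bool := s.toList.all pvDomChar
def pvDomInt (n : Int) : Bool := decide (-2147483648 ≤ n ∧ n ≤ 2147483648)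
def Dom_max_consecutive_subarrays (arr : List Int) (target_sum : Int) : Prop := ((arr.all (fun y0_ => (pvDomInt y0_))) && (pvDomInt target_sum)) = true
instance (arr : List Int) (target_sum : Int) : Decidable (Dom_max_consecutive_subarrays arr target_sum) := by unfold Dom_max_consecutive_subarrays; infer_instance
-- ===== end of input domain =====

-- B replaces A's single interleaved counter/reset loop by two passes: build the window-match
-- boolean sequence, then measure the longest run of consecutive Trues (objective: alternative).

-- ===== PORT A =====
def max_consecutive_subarrays (arr : List Int) (target_sum : Int) : Int :=
  let n : Int := (arr.length : Int)
  let st := (PySem.List.pyRange 0 n 1).foldl (fun (st : Int × Int) i =>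
      if i + 2 < n then
        let current_sum := PySem.List.pyGetD arr i 0 + PySem.List.pyGetD arr (i+1) 0
                             + PySem.List.pyGetD arr (i+2) 0
        if current_sum = target_sum then (st.1 + 1, max st.2 (st.1 + 1))
        else (0, st.2)
      else st) (0, 0)
  st.2

-- ===== PORT B =====
-- the outer while loop over the remaining suffix of 'matches': a false head is skipped,
-- a true head starts a run -- the inner 'while j < n and matches[j]' scan is the leading
-- takeWhile of the tail, and jumping to i = j is continuing on the dropWhile suffix
def pvScan : List Bool → Int → Int
  | [], best => best
  | true :: t, best =>
      let run : Int := 1 + ((t.takeWhile (fun x => x)).length : Int)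
      pvScan (t.dropWhile (fun x => x)) (max best run)
  | false :: t, best => pvScan t best
termination_by l _ => l.length
decreasing_by
  · exact Nat.lt_succ_of_le (List.length_dropWhile_le _ _)
  · exact Nat.lt_succ_self _

def max_consecutive_subarrays_alt (arr : List Int) (target_sum : Int) : Int :=
  let n : Int := (arr.length : Int)
  let ms := (PySem.List.pyRange 0 (n - 2) 1).map (fun i =>
      decide (PySem.List.pyGetD arr i 0 + PySem.List.pyGetD arr (i+1) 0
                + PySem.List.pyGetD arr (i+2) 0 = target_sum))
  pvScan ms 0

-- ===== PRECONDITION & SPEC =====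
def Spec_max_consecutive_subarrays (arr : List Int) (target_sum : Int) (out : Int) : Prop := out = max_consecutive_subarrays_alt arr target_sum
instance (arr : List Int) (target_sum : Int) (out : Int) : Decidable (Spec_max_consecutive_subarrays arr target_sum out) := by unfold Spec_max_consecutive_subarrays; infer_instance

-- ===== CLAIM (what is proved, stated in full; the proofs are below) =====
def Claim_equal_max_consecutive_subarrays : Prop := ∀ (arr : List Int) (target_sum : Int), Dom_max_consecutive_subarrays arr target_sum → Spec_max_consecutive_subarrays arr target_sum (max_consecutive_subarrays arr target_sum)

-- ===== LEMMAS AND PROOFS =====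

-- proof-side characterisation: longest run of consecutive True values
def pvLongestRun : List Bool → Int
  | [] => 0
  | true :: t =>
      max (1 + ((t.takeWhile (fun x => x)).length : Int))
          (pvLongestRun (t.dropWhile (fun x => x)))
  | false :: t => pvLongestRun t
termination_by l => l.length
decreasing_by
  · exact Nat.lt_succ_of_le (List.length_dropWhile_le _ _)
  · exact Nat.lt_succ_self _

-- the run-counting step A's loop applies to each window result
def pvStep (st : Int × Int) (b : Bool) : Int × Int :=
  if b then (st.1 + 1, max st.2 (st.1 + 1)) else (0, st.2)

-- leading-True-run length
def pvLead (l : List Bool) : Int := ((l.takeWhile (fun x => x)).length : Int)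

theorem pvLead_nonneg (l : List Bool) : 0 ≤ pvLead l := by
  simp [pvLead]

theorem pvLongestRun_nonneg (l : List Bool) : 0 ≤ pvLongestRun l := by
  induction l using pvLongestRun.induct with
  | case1 => simp [pvLongestRun]
  | case2 t ih =>
      simp only [pvLongestRun]
      omega
  | case3 t ih =>
      simp only [pvLongestRun]
      exact ih

-- peel the leading True run off pvLongestRun
theorem pvLongestRun_peel (l : List Bool) :
    pvLongestRun l = max (pvLead l) (pvLongestRun (l.dropWhile (fun x => x))) := by
  cases l with
  | nil => simp [pvLongestRun, pvLead]
  | cons b t =>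
      cases b with
      | false =>
          have h := pvLongestRun_nonneg (false :: t)
          simp [pvLongestRun, pvLead, List.takeWhile, List.dropWhile] at *
          omega
      | true =>
          simp [pvLongestRun, pvLead, List.takeWhile, List.dropWhile]
          omega

theorem pvLead_le (l : List Bool) : pvLead l ≤ pvLongestRun l := by
  rw [pvLongestRun_peel]
  have := pvLongestRun_nonneg (l.dropWhile (fun x => x))
  omega

theorem pvLongestRun_cons_true (t : List Bool) :
    pvLongestRun (true :: t) = max (1 + pvLead t) (pvLongestRun t) := by
  conv_rhs => rw [pvLongestRun_peel t]
  simp only [pvLongestRun, pvLead]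
  have := pvLead_nonneg t
  have h2 := pvLongestRun_nonneg (t.dropWhile (fun x => x))
  simp [pvLead] at *
  omega

-- invariant for A's counter/max loop, expressed over the boolean sequence
theorem pvFold_eq (l : List Bool) : ∀ (c mx : Int), 0 ≤ c → c ≤ mx →
    (l.foldl pvStep (c, mx)).2 = max mx (max (c + pvLead l) (pvLongestRun l)) := by
  induction l with
  | nil =>
      intro c mx h0 h1
      simp [pvLongestRun, pvLead]
      omega
  | cons b t ih =>
      intro c mx h0 h1
      cases b with
      | true =>
          have step : pvStep (c, mx) true = (c + 1, max mx (c + 1)) := by simp [pvStep]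
          rw [List.foldl_cons, step,
            ih (c + 1) (max mx (c + 1)) (by omega) (by omega)]
          rw [pvLongestRun_cons_true]
          have hl : pvLead (true :: t) = 1 + pvLead t := by
            simp [pvLead, List.takeWhile]
            omega
          rw [hl]
          have := pvLead_nonneg t
          have := pvLongestRun_nonneg t
          simp [pvLead] at *
          omega
      | false =>
          have step : pvStep (c, mx) false = (0, mx) := by simp [pvStep]
          rw [List.foldl_cons, step, ih 0 mx (by omega) (by omega)]
          have hl : pvLead (false :: t) = 0 := by simp [pvLead, List.takeWhile]
          have hr : pvLongestRun (false :: t) = pvLongestRun t := by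
            simp [pvLongestRun]
          rw [hl, hr]
          have := pvLead_le t
          omega

-- iterations with i ≥ n - 2 leave the state unchanged
theorem pvNoop (n : Int) (body : Int × Int → Int → Int × Int)
    (hbody : ∀ st i, ¬ i + 2 < n → body st i = st) :
    ∀ (l : List Int) (st : Int × Int), (∀ i ∈ l, ¬ i + 2 < n) →
      l.foldl body st = st := by
  intro l
  induction l with
  | nil => intro st _; rfl
  | cons x t ih =>
      intro st h
      rw [List.foldl_cons, hbody st x (h x (by simp)), ih st (fun i hi => h i (by simp [hi]))]

theorem max_consecutive_subarrays_eq_fold (arr : List Int) (target_sum : Int) :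
    max_consecutive_subarrays arr target_sum =
      (((PySem.List.pyRange 0 ((arr.length : Int) - 2) 1).map (fun i =>
          decide (PySem.List.pyGetD arr i 0 + PySem.List.pyGetD arr (i+1) 0
                    + PySem.List.pyGetD arr (i+2) 0 = target_sum))).foldl pvStep (0, 0)).2 := by
  unfold max_consecutive_subarrays
  simp only []
  set n : Int := (arr.length : Int) with hn
  have hn0 : 0 ≤ n := by simp [hn]
  set body : Int × Int → Int → Int × Int := fun st i =>
      if i + 2 < n then
        (if PySem.List.pyGetD arr i 0 + PySem.List.pyGetD arr (i+1) 0
              + PySem.List.pyGetD arr (i+2) 0 = target_sum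
         then (st.1 + 1, max st.2 (st.1 + 1)) else (0, st.2))
      else st with hbody
  set k : Int := max 0 (n - 2) with hk
  have hsplit : PySem.List.pyRange 0 n 1 =
      PySem.List.pyRange 0 k 1 ++ PySem.List.pyRange k n 1 :=
    PySem.List.pyRange_one_append 0 k n (by omega) (by omega)
  rw [hsplit, List.foldl_append]
  have hno : (PySem.List.pyRange k n 1).foldl body
      ((PySem.List.pyRange 0 k 1).foldl body (0, 0)) =
      (PySem.List.pyRange 0 k 1).foldl body (0, 0) := by
    refine pvNoop n body ?_ _ _ ?_
    · intro st i h; simp [hbody, if_neg h]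
    · intro i hi
      rw [PySem.List.mem_pyRange_one] at hi
      omega
  rw [hno]
  have hrange : PySem.List.pyRange 0 (n - 2) 1 = PySem.List.pyRange 0 k 1 := by
    by_cases h : n - 2 ≤ 0
    · rw [PySem.List.pyRange_one_eq_nil h, PySem.List.pyRange_one_eq_nil (by omega)]
    · have : k = n - 2 := by omega
      rw [this]
  rw [hrange, List.foldl_map]
  refine congrArg Prod.snd (PySem.List.foldl_congr_mem _ _ _ _ ?_)
  intro st i hi
  rw [PySem.List.mem_pyRange_one] at hi
  have hi2 : i + 2 < n := by omega
  simp only [hbody, if_pos hi2, pvStep]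
  by_cases hs : PySem.List.pyGetD arr i 0 + PySem.List.pyGetD arr (i+1) 0
      + PySem.List.pyGetD arr (i+2) 0 = target_sum
  · simp [hs]
  · simp [hs]


theorem pvScan_eq (l : List Bool) : ∀ (best : Int), 0 ≤ best →
    pvScan l best = max best (pvLongestRun l) := by
  induction l using pvLongestRun.induct with
  | case1 => intro best h; simp [pvScan, pvLongestRun]; omega
  | case2 t ih =>
      intro best h
      simp only [pvScan, pvLongestRun]
      have h2 : (0 : Int) ≤ ((t.takeWhile (fun x => x)).length : Int) := by positivity
      rw [ih _ (by omega)]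
      have h1 := pvLongestRun_nonneg (t.dropWhile (fun x => x))
      omega
  | case3 t ih =>
      intro best h
      simp only [pvScan, pvLongestRun]
      exact ih best h

-- ===== VERDICT (by name: the statement is the Claim_ definition above) =====
theorem max_consecutive_subarrays_spec : Claim_equal_max_consecutive_subarrays := by
  intro arr target_sum _
  unfold Spec_max_consecutive_subarrays max_consecutive_subarrays_alt
  rw [max_consecutive_subarrays_eq_fold]
  simp only []
  set m := (PySem.List.pyRange 0 ((arr.length : Int) - 2) 1).map (fun i =>
      decide (PySem.List.pyGetD arr i 0 + PySem.List.pyGetD arr (i+1) 0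
                + PySem.List.pyGetD arr (i+2) 0 = target_sum)) with hm
  rw [pvFold_eq m 0 0 le_rfl le_rfl, pvScan_eq m 0 le_rfl]
  have := pvLead_le m
  have := pvLongestRun_nonneg m
  omega
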